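-- pv_equiv track=rewrite | github.com/data-S-index/dev-pipeline | generate-authors.py | _is_orcid
-- ===== SOURCE A (Python) =====
-- def _is_orcid(normalized_id: str) -> bool:
--     """Return True if normalized_id looks like an ORCID (4-4-4-4 hex, last group can end in x)."""
--     if not normalized_id or len(normalized_id) != 19:
--         return False
--     # 0000-0000-0000-0000 or 0000-0000-0000-000x
--     parts = normalized_id.split("-")
--     if len(parts) != 4:
--         return False
--     for i, part in enumerate(parts):
--         if len(part) != 4:
--             return False
--         allowed = "0123456789abcdef" if i < 3 else "0123456789abcdefx"
--         if any(c not in allowed for c in part.lower()):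
--             return False
--     return True
-- ===== SOURCE B (Python) =====
-- _CANON = "hhhh-hhhh-hhhh-hhhh"
--
--
-- def _is_orcid(normalized_id: str) -> bool:
--     """Return True if normalized_id looks like an ORCID (4-4-4-4 hex, last group can end in x)."""
--     if not normalized_id:
--         return False
--     canon = []
--     for i, c in enumerate(normalized_id):
--         if c == "-":
--             canon.append("-")
--         elif c in "0123456789abcdefABCDEF" or (i >= 15 and c in "xX"):
--             canon.append("h")
--         else:
--             canon.append("?")
--     return "".join(canon) == _CANON
-- ===== Notes on version B (the rewrite author's own statement) =====
-- stated objective: alternative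
-- what changed: B canonicalizes the whole string in one enumerate pass -- mapping each character to a class symbol (dash, hex incl. x/X past position 14, or other) -- and returns whether the resulting class string equals a fixed 19-character template; A's split-on-dash, per-group loop, length checks and lower() all disappear.
import Mathlib
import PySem

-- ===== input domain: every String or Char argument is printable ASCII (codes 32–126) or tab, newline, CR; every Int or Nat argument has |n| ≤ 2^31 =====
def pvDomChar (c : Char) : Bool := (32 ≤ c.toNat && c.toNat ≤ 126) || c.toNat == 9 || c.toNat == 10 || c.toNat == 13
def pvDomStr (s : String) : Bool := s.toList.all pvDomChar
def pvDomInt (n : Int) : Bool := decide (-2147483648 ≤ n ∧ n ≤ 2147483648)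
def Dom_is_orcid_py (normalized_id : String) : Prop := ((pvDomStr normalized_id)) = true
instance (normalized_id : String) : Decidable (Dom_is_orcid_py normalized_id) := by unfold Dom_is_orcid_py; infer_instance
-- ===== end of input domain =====

-- B canonicalizes the string in one enumerate pass (each char mapped to a class symbol) and
-- compares the class string with the fixed template "hhhh-hhhh-hhhh-hhhh"; objective: alternative.

-- ===== PORT A =====
-- `allowed` string chosen per group index, as in A
def pvAllowed (i : Nat) : List Char :=
  if i < 3 then "0123456789abcdef".toList else "0123456789abcdefx".toList

-- the `for i, part in enumerate(parts)` loop with its early returns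
-- (`c not in allowed` for a single char c is membership, ported as List.contains)
def pvCheckParts : Nat → List (List Char) → Bool
  | _, [] => true
  | i, part :: rest =>
    if part.length ≠ 4 then false
    else if (PySem.Chars.lower part).any (fun c => !((pvAllowed i).contains c)) then false
    else pvCheckParts (i + 1) rest

def is_orcid_py (normalized_id : String) : Bool :=
  let l := normalized_id.toList
  if l.isEmpty || l.length ≠ 19 then false
  else
    let parts := PySem.Chars.splitOn l ['-']
    if parts.length ≠ 4 then false
    else pvCheckParts 0 parts

-- ===== PORT B =====
def pvHexDigits : List Char := "0123456789ABCDEFabcdef".toList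

-- the per-character classification done in Source B's loop body (i is Python's enumerate index)
def pvClass (i : Int) (c : Char) : Char :=
  if c = '-' then '-'
  else if pvHexDigits.contains c || (decide (15 ≤ i) && ("xX".toList).contains c) then 'h'
  else '?'

-- the `for i, c in enumerate(...)` loop building `canon`
def pvClassify (l : List Char) : List Char :=
  (PySem.List.enumerate l).map (fun p => pvClass p.1 p.2)

def pvCanon : List Char := "hhhh-hhhh-hhhh-hhhh".toList

def is_orcid_py_alt (normalized_id : String) : Bool :=
  let l := normalized_id.toList
  if l.isEmpty then false
  else pvClassify l == pvCanon

-- ===== PRECONDITION & SPEC =====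
def Spec_is_orcid_py (normalized_id : String) (out : Bool) : Prop := out = is_orcid_py_alt normalized_id
instance (normalized_id : String) (out : Bool) : Decidable (Spec_is_orcid_py normalized_id out) := by unfold Spec_is_orcid_py; infer_instance

-- ===== CLAIM (what is proved, stated in full; the proofs are below) =====
def Claim_equal_is_orcid_py : Prop := ∀ (normalized_id : String), Dom_is_orcid_py normalized_id → Spec_is_orcid_py normalized_id (is_orcid_py normalized_id)

-- ===== LEMMAS AND PROOFS =====

theorem char_eq_iff_toNat (a b : Char) : a = b ↔ a.toNat = b.toNat :=
  ⟨fun h => h ▸ rfl, fun h => Char.ext (UInt32.toNat_inj.mp h)⟩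

theorem char_le_iff_toNat (a b : Char) : a ≤ b ↔ a.toNat ≤ b.toNat := by
  rw [Char.le_def]
  exact ⟨fun h => UInt32.le_iff_toNat_le.mp h, fun h => UInt32.le_iff_toNat_le.mpr h⟩

-- PySem.Chars.lowerChar's image of a char, as a Nat
theorem lowerChar_toNat (c : Char) : (PySem.Chars.lowerChar c).toNat =
    if 65 ≤ c.toNat ∧ c.toNat ≤ 90 then c.toNat + 32 else c.toNat := by
  simp only [PySem.Chars.lowerChar, PySem.Chars.isupper]
  by_cases h : 65 ≤ c.toNat ∧ c.toNat ≤ 90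
  · rw [if_pos, if_pos h]
    · rw [Char.toNat_ofNat, if_pos]; exact Or.inl (by omega)
    · simp only [Bool.and_eq_true, decide_eq_true_eq, char_le_iff_toNat]
      exact ⟨h.1, h.2⟩
  · rw [if_neg, if_neg h]
    simp only [Bool.and_eq_true, decide_eq_true_eq, char_le_iff_toNat]
    exact fun hc => h ⟨hc.1, hc.2⟩

-- A's lowercase-then-member test equals case-inclusive hex membership
theorem charL1 (c : Char) :
    ("0123456789abcdef".toList).contains (PySem.Chars.lowerChar c) = pvHexDigits.contains c := by
  apply Bool.eq_iff_iff.mpr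
  have h1 : "0123456789abcdef".toList = ['0','1','2','3','4','5','6','7','8','9','a','b','c','d','e','f'] := rfl
  have h2 : pvHexDigits = ['0','1','2','3','4','5','6','7','8','9','A','B','C','D','E','F','a','b','c','d','e','f'] := rfl
  rw [h1, h2]
  simp only [List.contains_eq_mem, List.mem_cons, List.not_mem_nil, or_false, decide_eq_true_eq,
    char_eq_iff_toNat, lowerChar_toNat,
    show ('0' : Char).toNat = 48 from rfl, show ('1' : Char).toNat = 49 from rfl,
    show ('2' : Char).toNat = 50 from rfl, show ('3' : Char).toNat = 51 from rfl,
    show ('4' : Char).toNat = 52 from rfl, show ('5' : Char).toNat = 53 from rfl,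
    show ('6' : Char).toNat = 54 from rfl, show ('7' : Char).toNat = 55 from rfl,
    show ('8' : Char).toNat = 56 from rfl, show ('9' : Char).toNat = 57 from rfl,
    show ('a' : Char).toNat = 97 from rfl, show ('b' : Char).toNat = 98 from rfl,
    show ('c' : Char).toNat = 99 from rfl, show ('d' : Char).toNat = 100 from rfl,
    show ('e' : Char).toNat = 101 from rfl, show ('f' : Char).toNat = 102 from rfl,
    show ('A' : Char).toNat = 65 from rfl, show ('B' : Char).toNat = 66 from rfl,
    show ('C' : Char).toNat = 67 from rfl, show ('D' : Char).toNat = 68 from rfl,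
    show ('E' : Char).toNat = 69 from rfl, show ('F' : Char).toNat = 70 from rfl]
  by_cases h : 65 ≤ c.toNat ∧ c.toNat ≤ 90
  · rw [if_pos h]; omega
  · rw [if_neg h]; omega

-- same for the last group, where 'x'/'X' is also allowed
theorem charL2 (c : Char) :
    ("0123456789abcdefx".toList).contains (PySem.Chars.lowerChar c)
      = (pvHexDigits.contains c || ("xX".toList).contains c) := by
  apply Bool.eq_iff_iff.mpr
  have h1 : "0123456789abcdefx".toList = ['0','1','2','3','4','5','6','7','8','9','a','b','c','d','e','f','x'] := rfl
  have h2 : pvHexDigits = ['0','1','2','3','4','5','6','7','8','9','A','B','C','D','E','F','a','b','c','d','e','f'] := rfl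
  have h3 : "xX".toList = ['x','X'] := rfl
  rw [h1, h2, h3]
  simp only [List.contains_eq_mem, Bool.or_eq_true, List.mem_cons, List.not_mem_nil, or_false,
    decide_eq_true_eq, char_eq_iff_toNat, lowerChar_toNat,
    show ('0' : Char).toNat = 48 from rfl, show ('1' : Char).toNat = 49 from rfl,
    show ('2' : Char).toNat = 50 from rfl, show ('3' : Char).toNat = 51 from rfl,
    show ('4' : Char).toNat = 52 from rfl, show ('5' : Char).toNat = 53 from rfl,
    show ('6' : Char).toNat = 54 from rfl, show ('7' : Char).toNat = 55 from rfl,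
    show ('8' : Char).toNat = 56 from rfl, show ('9' : Char).toNat = 57 from rfl,
    show ('a' : Char).toNat = 97 from rfl, show ('b' : Char).toNat = 98 from rfl,
    show ('c' : Char).toNat = 99 from rfl, show ('d' : Char).toNat = 100 from rfl,
    show ('e' : Char).toNat = 101 from rfl, show ('f' : Char).toNat = 102 from rfl,
    show ('A' : Char).toNat = 65 from rfl, show ('B' : Char).toNat = 66 from rfl,
    show ('C' : Char).toNat = 67 from rfl, show ('D' : Char).toNat = 68 from rfl,
    show ('E' : Char).toNat = 69 from rfl, show ('F' : Char).toNat = 70 from rfl,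
    show ('x' : Char).toNat = 120 from rfl, show ('X' : Char).toNat = 88 from rfl]
  by_cases h : 65 ≤ c.toNat ∧ c.toNat ≤ 90
  · rw [if_pos h]; omega
  · rw [if_neg h]; omega

theorem go_eq (l : List Char) : ∀ (fuel : Nat) (cur : List Char) (acc : List (List Char)),
    l.length < fuel →
    PySem.Chars.splitOn.go ['-'] fuel l cur acc
      = acc.reverse ++ (List.splitOnP (fun c => c == '-') l).modifyHead (cur.reverse ++ ·) := by
  induction l with
  | nil =>
    intro fuel cur acc h
    match fuel with
    | f + 1 => simp [PySem.Chars.splitOn.go, List.splitOnP_nil]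
  | cons c rest ih =>
    intro fuel cur acc h
    match fuel with
    | f + 1 =>
      by_cases hc : c = '-'
      · subst hc
        rw [PySem.Chars.splitOn.go]
        simp only [List.isPrefixOf, beq_self_eq_true, Bool.true_and, if_true,
          List.length_cons, List.length_nil, List.drop_succ_cons, List.drop_zero]
        rw [ih f [] (cur.reverse :: acc) (by simpa using Nat.lt_of_succ_lt_succ h)]
        simp only [List.splitOnP_cons, beq_self_eq_true, if_true, List.reverse_cons,
          List.append_assoc, List.singleton_append]
        have : List.modifyHead (fun x : List Char => x) (List.splitOnP (fun c => c == '-') rest)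
            = List.splitOnP (fun c => c == '-') rest := by
          cases List.splitOnP (fun c => c == '-') rest <;> simp
        simp [this]
      · rw [PySem.Chars.splitOn.go]
        have hpre : ['-'].isPrefixOf (c :: rest) = false := by
          simp [List.isPrefixOf]; exact fun hh => absurd hh.symm hc
        rw [hpre]
        simp only [Bool.false_eq_true, if_false]
        rw [ih f (c :: cur) acc (by simpa using Nat.lt_of_succ_lt_succ h)]
        rw [List.splitOnP_cons, if_neg (by simp [hc]), List.modifyHead_modifyHead]
        have hfun : (fun x => (c :: cur).reverse ++ x) = ((fun x => cur.reverse ++ x) ∘ List.cons c) := by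
          funext x; simp
        rw [hfun]

-- Python's str.split("-") is Mathlib's List.splitOn '-'
theorem pysplit_eq (l : List Char) :
    PySem.Chars.splitOn l ['-'] = List.splitOn '-' l := by
  rw [PySem.Chars.splitOn, go_eq l (l.length + 1) [] [] (by omega)]
  have : List.modifyHead (fun x : List Char => x) (List.splitOnP (fun c => c == '-') l)
      = List.splitOnP (fun c => c == '-') l := by
    cases List.splitOnP (fun c => c == '-') l <;> simp
  simpa [List.splitOn] using this

-- the common characterisation both programs compute
def pvShape (l : List Char) : Prop :=
  ∃ p0 p1 p2 p3 : List Char,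
    l = p0 ++ '-' :: (p1 ++ '-' :: (p2 ++ '-' :: p3)) ∧
    p0.length = 4 ∧ p1.length = 4 ∧ p2.length = 4 ∧ p3.length = 4 ∧
    (∀ c ∈ p0, pvHexDigits.contains c = true) ∧
    (∀ c ∈ p1, pvHexDigits.contains c = true) ∧
    (∀ c ∈ p2, pvHexDigits.contains c = true) ∧
    (∀ c ∈ p3, (pvHexDigits.contains c || ("xX".toList).contains c) = true)

theorem intercalate_four (p0 p1 p2 p3 : List Char) :
    ['-'].intercalate [p0, p1, p2, p3] = p0 ++ '-' :: (p1 ++ '-' :: (p2 ++ '-' :: p3)) := by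
  simp [List.intercalate]

theorem lower_mem_iff (p : List Char) :
    (∀ x ∈ PySem.Chars.lower p, x ∈ "0123456789abcdef".toList)
      ↔ (∀ c ∈ p, pvHexDigits.contains c = true) := by
  simp only [PySem.Chars.lower, List.forall_mem_map]
  constructor <;> intro h c hc
  · rw [← charL1 c]; simpa [List.contains_eq_mem] using h c hc
  · have := h c hc; rw [← charL1 c] at this; simpa [List.contains_eq_mem] using this

theorem lowerx_mem_iff (p : List Char) :
    (∀ x ∈ PySem.Chars.lower p, x ∈ "0123456789abcdefx".toList)
      ↔ (∀ c ∈ p, (pvHexDigits.contains c || ("xX".toList).contains c) = true) := by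
  simp only [PySem.Chars.lower, List.forall_mem_map]
  constructor <;> intro h c hc
  · rw [← charL2 c]; simpa [List.contains_eq_mem] using h c hc
  · have := h c hc; rw [← charL2 c] at this; simpa [List.contains_eq_mem] using this

theorem a_iff_shape (l : List Char) :
    (if l.isEmpty || l.length ≠ 19 then false
     else if (PySem.Chars.splitOn l ['-']).length ≠ 4 then false
     else pvCheckParts 0 (PySem.Chars.splitOn l ['-'])) = true ↔ pvShape l := by
  rw [pysplit_eq]
  constructor
  · intro h
    split_ifs at h with h1 h2
    rcases hps : List.splitOn '-' l with _ | ⟨p0, _ | ⟨p1, _ | ⟨p2, _ | ⟨p3, _ | ⟨p4, rest⟩⟩⟩⟩⟩ <;>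
      rw [hps] at h2 <;> simp at h2
    rw [hps] at h
    simp only [pvCheckParts, pvAllowed] at h
    norm_num at h
    obtain ⟨e0, a0, e1, a1, e2, a2, e3, a3⟩ := h
    refine ⟨p0, p1, p2, p3, ?_, e0, e1, e2, e3, (lower_mem_iff p0).mp a0,
      (lower_mem_iff p1).mp a1, (lower_mem_iff p2).mp a2, (lowerx_mem_iff p3).mp a3⟩
    have := List.intercalate_splitOn l '-'
    rw [hps, intercalate_four] at this
    exact this.symm
  · rintro ⟨p0, p1, p2, p3, hl, e0, e1, e2, e3, a0, a1, a2, a3⟩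
    have hlen : l.length = 19 := by
      subst hl; simp [e0, e1, e2, e3]
    have hnomem : ∀ p ∈ [p0, p1, p2, p3], '-' ∉ p := by
      intro p hp hm
      have hhex : pvHexDigits.contains '-' = false := by decide
      have hxx : ("xX".toList).contains '-' = false := by decide
      fin_cases hp
      · have := a0 '-' hm; rw [hhex] at this; exact absurd this (by simp)
      · have := a1 '-' hm; rw [hhex] at this; exact absurd this (by simp)
      · have := a2 '-' hm; rw [hhex] at this; exact absurd this (by simp)
      · have := a3 '-' hm; rw [hhex, hxx] at this; exact absurd this (by simp)
    have hsplit : List.splitOn '-' l = [p0, p1, p2, p3] := by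
      rw [hl, ← intercalate_four]
      exact List.splitOn_intercalate [p0, p1, p2, p3] '-' hnomem (by simp)
    rw [if_neg, if_neg]
    · rw [hsplit]
      simp only [pvCheckParts, pvAllowed]
      norm_num
      exact ⟨e0, (lower_mem_iff p0).mpr a0, e1, (lower_mem_iff p1).mpr a1,
        e2, (lower_mem_iff p2).mpr a2, e3, (lowerx_mem_iff p3).mpr a3⟩
    · rw [hsplit]; simp
    · simp [hlen, List.isEmpty_iff]
      intro hnil; rw [hnil] at hlen; simp at hlen

-- facts about the classifier
theorem class_dash (i : Int) (c : Char) (h : pvClass i c = '-') : c = '-' := by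
  unfold pvClass at h
  split_ifs at h with h1 h2
  · exact h1
  · exact absurd h (by decide)
  · exact absurd h (by decide)

theorem class_h (i : Int) (c : Char) (h : pvClass i c = 'h') :
    pvHexDigits.contains c = true ∨ (15 ≤ i ∧ ("xX".toList).contains c = true) := by
  unfold pvClass at h
  split_ifs at h with h1 h2
  · exact absurd h (by decide)
  · rcases (show pvHexDigits.contains c = true ∨
        (decide (15 ≤ i) = true ∧ ("xX".toList).contains c = true) by simpa using h2) with hh | ⟨hd, hx⟩
    · exact Or.inl hh
    · exact Or.inr ⟨of_decide_eq_true hd, hx⟩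
  · exact absurd h (by decide)

theorem class_of_hex (i : Int) (c : Char) (h : pvHexDigits.contains c = true) :
    pvClass i c = 'h' := by
  have hnd : c ≠ '-' := by
    intro e; rw [e] at h; exact absurd h (by decide)
  unfold pvClass
  rw [if_neg hnd, h]
  simp

theorem class_of_last (i : Int) (c : Char) (hi : 15 ≤ i)
    (h : (pvHexDigits.contains c || ("xX".toList).contains c) = true) :
    pvClass i c = 'h' := by
  rcases (show pvHexDigits.contains c = true ∨ ("xX".toList).contains c = true by simpa using h)
      with hh | hh
  · exact class_of_hex i c hh
  · have hnd : c ≠ '-' := by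
      intro e; rw [e] at hh; exact absurd hh (by decide)
    unfold pvClass
    rw [if_neg hnd, hh, decide_eq_true hi]
    simp

-- a block of hex chars classifies to a run of 'h', whatever the start index
theorem classify_block (p : List Char) (s : Int)
    (h : ∀ c ∈ p, pvHexDigits.contains c = true) :
    (PySem.List.enumerate p s).map (fun q => pvClass q.1 q.2) = List.replicate p.length 'h' := by
  have hcg : ∀ q ∈ PySem.List.enumerate p s, (fun q : Int × Char => pvClass q.1 q.2) q = 'h' := by
    intro q hq
    rcases (PySem.List.mem_enumerate_iff _ _ _).mp hq with ⟨k, hk, rfl⟩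
    exact class_of_hex _ _ (h _ (p.getElem_mem hk))
  rw [List.map_congr_left hcg, List.map_const', PySem.List.length_enumerate]

-- the last block starts at index 15, so x/X also classifies to 'h'
theorem classify_last (p : List Char) (s : Int) (hs : 15 ≤ s)
    (h : ∀ c ∈ p, (pvHexDigits.contains c || ("xX".toList).contains c) = true) :
    (PySem.List.enumerate p s).map (fun q => pvClass q.1 q.2) = List.replicate p.length 'h' := by
  have hcg : ∀ q ∈ PySem.List.enumerate p s, (fun q : Int × Char => pvClass q.1 q.2) q = 'h' := by
    intro q hq
    rcases (PySem.List.mem_enumerate_iff _ _ _).mp hq with ⟨k, hk, rfl⟩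
    exact class_of_last _ _ (by omega) (h _ (p.getElem_mem hk))
  rw [List.map_congr_left hcg, List.map_const', PySem.List.length_enumerate]

theorem class_dash_val (s : Int) : pvClass s '-' = '-' := by
  simp [pvClass]

theorem classify_getElem? (l : List Char) (k : Nat) :
    (pvClassify l)[k]? = l[k]?.map (fun c => pvClass (k : Int) c) := by
  simp [pvClassify, PySem.List.getElem?_enumerate, Option.map_map, Function.comp_def]

theorem b_iff_shape (l : List Char) :
    (if l.isEmpty then false else (pvClassify l == pvCanon)) = true ↔ pvShape l := by
  constructor
  · intro h
    split_ifs at h with h1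
    have heq : pvClassify l = pvCanon := by simpa using h
    have hlen : l.length = 19 := by
      have := congrArg List.length heq
      simpa [pvClassify, PySem.List.length_enumerate, pvCanon] using this
    have hat : ∀ (k : Nat) (hk19 : k < 19) (hk : k < l.length),
        pvClass (k : Int) (l[k]'hk) = pvCanon[k]'(by simp only [pvCanon]; simpa using hk19) := by
      intro k hk19 hk
      have h1 := classify_getElem? l k
      rw [heq, List.getElem?_eq_getElem hk, Option.map_some,
        List.getElem?_eq_getElem (by simp only [pvCanon]; simpa using hk19)] at h1
      exact (Option.some.inj h1).symm
    have e4 : l[4]'(by omega) = '-' := class_dash _ _ (by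
      have := hat 4 (by omega) (by omega); simpa [pvCanon] using this)
    have e9 : l[9]'(by omega) = '-' := class_dash _ _ (by
      have := hat 9 (by omega) (by omega); simpa [pvCanon] using this)
    have e14 : l[14]'(by omega) = '-' := class_dash _ _ (by
      have := hat 14 (by omega) (by omega); simpa [pvCanon] using this)
    have hshape : l = l.take 4 ++ '-' :: ((l.drop 5).take 4 ++ '-' :: ((l.drop 10).take 4 ++ '-' :: l.drop 15)) := by
      conv_lhs => rw [← List.take_append_drop 4 l]
      rw [List.drop_eq_getElem_cons (by omega : 4 < l.length), e4]
      congr 1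
      congr 1
      conv_lhs => rw [← List.take_append_drop 4 (l.drop 5)]
      rw [List.drop_drop]
      rw [List.drop_eq_getElem_cons (by omega : 9 < l.length), e9]
      congr 2
      conv_lhs => rw [← List.take_append_drop 4 (l.drop 10)]
      rw [List.drop_drop]
      rw [List.drop_eq_getElem_cons (by omega : 14 < l.length), e14]
    have hhval : ∀ (k : Nat) (hk19 : k < 19),
        pvCanon[k]'(by simp only [pvCanon]; simpa using hk19) = 'h' →
        ∀ (hk : k < l.length), pvClass (k : Int) (l[k]'hk) = 'h' := by
      intro k hk19 hcv hk
      rw [hat k hk19 hk, hcv]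
    refine ⟨l.take 4, (l.drop 5).take 4, (l.drop 10).take 4, l.drop 15, hshape,
      by simp [hlen], by simp [hlen], by simp [hlen], by simp [hlen], ?_, ?_, ?_, ?_⟩
    · intro c hc
      obtain ⟨i, hi, rfl⟩ := List.mem_iff_getElem.mp hc
      have hi4 : i < 4 := by simpa [hlen] using hi
      rw [List.getElem_take]
      have hcl := hhval i (by omega) (by interval_cases i <;> rfl) (by omega)
      rcases class_h _ _ hcl with hh | ⟨hge, _⟩
      · exact hh
      · omega
    · intro c hc
      obtain ⟨i, hi, rfl⟩ := List.mem_iff_getElem.mp hc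
      have hi4 : i < 4 := by simpa [hlen] using hi
      rw [List.getElem_take, List.getElem_drop]
      have hcl := hhval (5 + i) (by omega) (by interval_cases i <;> rfl) (by omega)
      rcases class_h _ _ hcl with hh | ⟨hge, _⟩
      · exact hh
      · omega
    · intro c hc
      obtain ⟨i, hi, rfl⟩ := List.mem_iff_getElem.mp hc
      have hi4 : i < 4 := by simpa [hlen] using hi
      rw [List.getElem_take, List.getElem_drop]
      have hcl := hhval (10 + i) (by omega) (by interval_cases i <;> rfl) (by omega)
      rcases class_h _ _ hcl with hh | ⟨hge, _⟩
      · exact hh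
      · omega
    · intro c hc
      obtain ⟨i, hi, rfl⟩ := List.mem_iff_getElem.mp hc
      have hi4 : i < 4 := by simpa [hlen] using hi
      rw [List.getElem_drop]
      have hcl := hhval (15 + i) (by omega) (by interval_cases i <;> rfl) (by omega)
      rcases class_h _ _ hcl with hh | ⟨_, hx⟩
      · rw [hh, Bool.true_or]
      · rw [hx, Bool.or_true]
  · rintro ⟨p0, p1, p2, p3, hl, e0, e1, e2, e3, a0, a1, a2, a3⟩
    have hlen : l.length = 19 := by subst hl; simp [e0, e1, e2, e3]
    rw [if_neg (by simp [List.isEmpty_iff]; intro hnil; rw [hnil] at hlen; simp at hlen)]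
    apply beq_iff_eq.mpr
    rw [hl]
    unfold pvClassify
    rw [show p0 ++ '-' :: (p1 ++ '-' :: (p2 ++ '-' :: p3))
        = p0 ++ ('-' :: p1) ++ ('-' :: p2) ++ ('-' :: p3) from by simp,
      PySem.List.enumerate_append, PySem.List.enumerate_append, PySem.List.enumerate_append,
      PySem.List.enumerate_cons, PySem.List.enumerate_cons, PySem.List.enumerate_cons]
    simp only [List.map_append, List.map_cons]
    rw [classify_block p0 _ a0, classify_block p1 _ a1, classify_block p2 _ a2,
      classify_last p3 _ (by simp [List.length_append, e0, e1, e2]) a3]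
    rw [e0, e1, e2, e3]
    rw [class_dash_val, class_dash_val, class_dash_val]
    decide

-- ===== VERDICT (by name: the statement is the Claim_ definition above) =====
theorem is_orcid_py_spec : Claim_equal_is_orcid_py := by
  intro s _
  unfold Spec_is_orcid_py
  have hiff := (a_iff_shape s.toList).trans (b_iff_shape s.toList).symm
  have ha : is_orcid_py s = (if s.toList.isEmpty || s.toList.length ≠ 19 then false
     else if (PySem.Chars.splitOn s.toList ['-']).length ≠ 4 then false
     else pvCheckParts 0 (PySem.Chars.splitOn s.toList ['-'])) := rfl
  have hb : is_orcid_py_alt s = (if s.toList.isEmpty then false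
     else (pvClassify s.toList == pvCanon)) := rfl
  rw [ha, hb]
  exact Bool.eq_iff_iff.mpr hiff
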